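-- pv_equiv track=rewrite | github.com/mega-slowpoke/quant | to_debug/okx-robot/utils.py | find_highs_lows_15m
-- ===== SOURCE A (Python) =====
-- def find_highs_lows_15m(retros, trend, ob_touch_index):
--     points = []
--     for i in range(1, len(retros) - 1):
--         prev, curr, next_ = retros[i - 1], retros[i], retros[i + 1]
--         h, l = curr[2], curr[3]
--         is_high = h > prev[2] and h > next_[2]
--         is_low = l < prev[3] and l < next_[3]
--         if is_high and is_low:
--             points.append((i, 'both', h, l))
--         elif is_high:
--             points.append((i, 'high', h))
--         elif is_low:
--             points.append((i, 'low', l))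
--     ob_k = retros[0]
--     if trend == 'uptrend':
--         points = [(0, 'low', ob_k[3])] + points
--     elif trend == 'downtrend':
--         points = [(0, 'high', ob_k[2])] + points
--     filtered = []
--     for p in points:
--         if not filtered:
--             if p[1] == 'both':
--                 filtered.append((p[0], 'high', p[2]))
--             else:
--                 filtered.append(p)
--         else:
--             last_type = filtered[-1][1]
--             if p[1] == 'both':
--                 chosen = 'low' if last_type == 'high' else 'high'
--                 value = p[3] if chosen == 'low' else p[2]
--                 filtered.append((p[0], chosen, value))
--             elif p[1] != last_type:
--                 filtered.append(p)
--             else: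
--                 if p[1] == 'high' and p[2] > filtered[-1][2]:
--                     filtered[-1] = p
--                 elif p[1] == 'low' and p[2] < filtered[-1][2]:
--                     filtered[-1] = p
--     return filtered
-- ===== SOURCE B (Python) =====
-- def find_highs_lows_15m(retros, trend, ob_touch_index):
--     filtered = []
--
--     def merge(idx, typ, val):
--         if not filtered:
--             filtered.append((idx, typ, val))
--         elif typ != filtered[-1][1]:
--             filtered.append((idx, typ, val))
--         elif typ == 'high' and val > filtered[-1][2]:
--             filtered[-1] = (idx, typ, val)
--         elif typ == 'low' and val < filtered[-1][2]:
--             filtered[-1] = (idx, typ, val)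
--
--     seed = {'uptrend': ('low', 3), 'downtrend': ('high', 2)}.get(trend)
--     if seed is not None:
--         merge(0, seed[0], retros[0][seed[1]])
--     for i in range(1, len(retros) - 1):
--         prev, curr, next_ = retros[i - 1], retros[i], retros[i + 1]
--         h, l = curr[2], curr[3]
--         is_high = h > prev[2] and h > next_[2]
--         is_low = l < prev[3] and l < next_[3]
--         if is_high and is_low:
--             if filtered and filtered[-1][1] == 'high':
--                 merge(i, 'low', l)
--             else:
--                 merge(i, 'high', h)
--         elif is_high:
--             merge(i, 'high', h)
--         elif is_low:
--             merge(i, 'low', l)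
--     return filtered
-- ===== Notes on version B (the rewrite author's own statement) =====
-- stated objective: simpler
-- what changed: A builds an intermediate candidate-point list (with 'both' tuples and a prepended trend seed) and then runs a second filtering pass over it; B seeds the result from the trend directly and classifies-and-merges each candle into the alternating result in a single fused loop, never materialising the points list.
-- outside the precondition, e.g. on find_highs_lows_15m([[0, 0, 5, 5], [0, 0, 1, 9], [0, 0]], 'flat', 0): A returns [], B returns []
import Mathlib
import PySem

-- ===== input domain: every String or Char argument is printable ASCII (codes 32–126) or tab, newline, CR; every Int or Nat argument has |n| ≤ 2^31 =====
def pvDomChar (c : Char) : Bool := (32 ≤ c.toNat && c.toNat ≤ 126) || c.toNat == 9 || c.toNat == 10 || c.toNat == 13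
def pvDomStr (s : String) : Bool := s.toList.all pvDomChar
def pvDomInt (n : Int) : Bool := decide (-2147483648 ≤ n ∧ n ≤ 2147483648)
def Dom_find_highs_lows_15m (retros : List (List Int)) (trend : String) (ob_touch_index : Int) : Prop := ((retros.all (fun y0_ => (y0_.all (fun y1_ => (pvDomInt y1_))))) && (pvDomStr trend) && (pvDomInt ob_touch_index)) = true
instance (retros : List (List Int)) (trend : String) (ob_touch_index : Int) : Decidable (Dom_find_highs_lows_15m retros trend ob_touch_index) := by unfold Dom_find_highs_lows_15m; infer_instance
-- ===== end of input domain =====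

-- B fuses A's two passes (build the candidate-point list, then the alternating filter)
-- into one loop that classifies each candle and merges it into the result directly;
-- objective: simpler (no intermediate `points` list, no 'both' tuples).

-- ===== PORT A =====
-- row[k] read; exact under Pre_ (rows have length ≥ 4, so indices 2/3 are in range)
def pvRowGet (row : List Int) (k : Int) : Int := (PySem.List.pyGet? row k).getD 0

-- the filter-loop body of A, on a candidate point (i, type, main value, low-value when 'both')
def pvStepA (filtered : List (Int × String × Int)) (p : Int × String × Int × Option Int) : List (Int × String × Int) :=
  match filtered.getLast? with
  | none =>
      if p.2.1 = "both" then [(p.1, "high", p.2.2.1)]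
      else [(p.1, p.2.1, p.2.2.1)]
  | some last =>
      let last_type := last.2.1
      if p.2.1 = "both" then
        let chosen := if last_type = "high" then "low" else "high"
        let value := if chosen = "low" then (p.2.2.2.getD 0) else p.2.2.1
        filtered ++ [(p.1, chosen, value)]
      else if p.2.1 ≠ last_type then filtered ++ [(p.1, p.2.1, p.2.2.1)]
      else if p.2.1 = "high" ∧ p.2.2.1 > last.2.2 then filtered.dropLast ++ [(p.1, p.2.1, p.2.2.1)]
      else if p.2.1 = "low" ∧ p.2.2.1 < last.2.2 then filtered.dropLast ++ [(p.1, p.2.1, p.2.2.1)]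
      else filtered

def find_highs_lows_15m (retros : List (List Int)) (trend : String) (ob_touch_index : Int) : List (Int × String × Int) :=
  let points : List (Int × String × Int × Option Int) :=
    (PySem.List.pyRange 1 ((retros.length : Int) - 1) 1).foldl (fun acc i =>
      let prev := (PySem.List.pyGet? retros (i - 1)).getD []
      let curr := (PySem.List.pyGet? retros i).getD []
      let next_ := (PySem.List.pyGet? retros (i + 1)).getD []
      let h := pvRowGet curr 2
      let l := pvRowGet curr 3
      let is_high := h > pvRowGet prev 2 ∧ h > pvRowGet next_ 2
      let is_low := l < pvRowGet prev 3 ∧ l < pvRowGet next_ 3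
      if is_high ∧ is_low then acc ++ [(i, "both", h, some l)]
      else if is_high then acc ++ [(i, "high", h, none)]
      else if is_low then acc ++ [(i, "low", l, (none : Option Int))]
      else acc) []
  let ob_k := (PySem.List.pyGet? retros 0).getD []
  let points :=
    if trend = "uptrend" then ((0 : Int), "low", pvRowGet ob_k 3, (none : Option Int)) :: points
    else if trend = "downtrend" then ((0 : Int), "high", pvRowGet ob_k 2, (none : Option Int)) :: points
    else points
  points.foldl pvStepA []

-- ===== PORT B =====
-- B's row[k] read; exact under Pre_ (rows have length ≥ 4)
def pvRowGetB (row : List Int) (k : Int) : Int := (PySem.List.pyGet? row k).getD 0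

-- B's merge: fold one classified point (idx, typ, val) into the alternating result
def pvMerge (filtered : List (Int × String × Int)) (idx : Int) (typ : String) (val : Int) : List (Int × String × Int) :=
  match filtered.getLast? with
  | none => [(idx, typ, val)]
  | some last =>
      if typ ≠ last.2.1 then filtered ++ [(idx, typ, val)]
      else if typ = "high" ∧ val > last.2.2 then filtered.dropLast ++ [(idx, typ, val)]
      else if typ = "low" ∧ val < last.2.2 then filtered.dropLast ++ [(idx, typ, val)]
      else filtered

def find_highs_lows_15m_alt (retros : List (List Int)) (trend : String) (ob_touch_index : Int) : List (Int × String × Int) :=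
  let seed : Option (String × Int) :=
    PySem.Dict.get? (PySem.Dict.ofList [("uptrend", ("low", (3 : Int))), ("downtrend", ("high", (2 : Int)))]) trend
  let filtered0 : List (Int × String × Int) :=
    match seed with
    | some (typ, k) => pvMerge [] 0 typ (pvRowGetB ((PySem.List.pyGet? retros 0).getD []) k)
    | none => []
  (PySem.List.pyRange 1 ((retros.length : Int) - 1) 1).foldl (fun filtered i =>
    let prev := (PySem.List.pyGet? retros (i - 1)).getD []
    let curr := (PySem.List.pyGet? retros i).getD []
    let next_ := (PySem.List.pyGet? retros (i + 1)).getD []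
    let h := pvRowGetB curr 2
    let l := pvRowGetB curr 3
    let is_high := h > pvRowGetB prev 2 ∧ h > pvRowGetB next_ 2
    let is_low := l < pvRowGetB prev 3 ∧ l < pvRowGetB next_ 3
    if is_high ∧ is_low then
      if (match filtered.getLast? with | some last => last.2.1 == "high" | none => false) then
        pvMerge filtered i "low" l
      else pvMerge filtered i "high" h
    else if is_high then pvMerge filtered i "high" h
    else if is_low then pvMerge filtered i "low" l
    else filtered) filtered0

-- ===== PRECONDITION & SPEC =====
-- Pre_ excludes the inputs where Python A raises an IndexError (empty retros, or a row
-- shorter than the candle indices 2/3 it reads); it is slightly narrower than the exact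
-- raise set only where A's `and` short-circuit skips reading a short last row (see cites).
def Pre_find_highs_lows_15m (retros : List (List Int)) (trend : String) (ob_touch_index : Int) : Prop :=
  retros ≠ [] ∧
  (3 ≤ retros.length → ∀ row ∈ retros, 4 ≤ row.length) ∧
  (trend = "uptrend" → 4 ≤ retros.headI.length) ∧
  (trend = "downtrend" → 3 ≤ retros.headI.length)
instance (retros : List (List Int)) (trend : String) (ob_touch_index : Int) : Decidable (Pre_find_highs_lows_15m retros trend ob_touch_index) := by unfold Pre_find_highs_lows_15m; infer_instance

def pvWitness_find_highs_lows_15m : List (List Int) × String × Int :=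
  ([[0, 0, 3, 1], [0, 0, 9, 0], [0, 0, 2, 1]], "uptrend", 0)

def Spec_find_highs_lows_15m (retros : List (List Int)) (trend : String) (ob_touch_index : Int) (out : List (Int × String × Int)) : Prop := out = find_highs_lows_15m_alt retros trend ob_touch_index
instance (retros : List (List Int)) (trend : String) (ob_touch_index : Int) (out : List (Int × String × Int)) : Decidable (Spec_find_highs_lows_15m retros trend ob_touch_index out) := by unfold Spec_find_highs_lows_15m; infer_instance

-- ===== CLAIM (what is proved, stated in full; the proofs are below) =====
def Claim_equal_find_highs_lows_15m : Prop := ∀ (retros : List (List Int)) (trend : String) (ob_touch_index : Int), Dom_find_highs_lows_15m retros trend ob_touch_index → Pre_find_highs_lows_15m retros trend ob_touch_index → Spec_find_highs_lows_15m retros trend ob_touch_index (find_highs_lows_15m retros trend ob_touch_index)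

-- ===== LEMMAS AND PROOFS =====

-- A's point-builder emits 0 or 1 candidate points per index; named for the fusion proof
def pvEmit (retros : List (List Int)) (i : Int) : List (Int × String × Int × Option Int) :=
  let prev := (PySem.List.pyGet? retros (i - 1)).getD []
  let curr := (PySem.List.pyGet? retros i).getD []
  let next_ := (PySem.List.pyGet? retros (i + 1)).getD []
  let h := pvRowGet curr 2
  let l := pvRowGet curr 3
  let is_high := h > pvRowGet prev 2 ∧ h > pvRowGet next_ 2
  let is_low := l < pvRowGet prev 3 ∧ l < pvRowGet next_ 3
  if is_high ∧ is_low then [(i, "both", h, some l)]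
  else if is_high then [(i, "high", h, none)]
  else if is_low then [(i, "low", l, (none : Option Int))]
  else []

-- an 'append what you emit' fold is a flatMap
theorem pv_foldl_emit_append {α β : Type} (f : List β → α → List β) (g : α → List β)
    (h : ∀ acc a, f acc a = acc ++ g a) :
    ∀ (l : List α) (acc : List β), l.foldl f acc = acc ++ l.flatMap g := by
  intro l
  induction l with
  | nil => intro acc; simp
  | cons a t ih => intro acc; simp [List.foldl_cons, h, ih, List.flatMap_cons]

-- a fold whose body folds `step` over what is emitted at each element is a fold of `step` over the flatMap
theorem pv_foldl_body_flatMap {α β σ : Type} (f : σ → α → σ) (g : α → List β) (step : σ → β → σ)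
    (h : ∀ st a, f st a = (g a).foldl step st) :
    ∀ (l : List α) (st : σ), l.foldl f st = (l.flatMap g).foldl step st := by
  intro l
  induction l with
  | nil => intro st; simp
  | cons a t ih => intro st; simp [List.foldl_cons, h, ih, List.flatMap_cons, List.foldl_append]

-- A's filter step on the points emitted at one index = B's fused loop body there
theorem pvStep_emit (retros : List (List Int)) (st : List (Int × String × Int)) (i : Int) :
    (let prev := (PySem.List.pyGet? retros (i - 1)).getD []
     let curr := (PySem.List.pyGet? retros i).getD []
     let next_ := (PySem.List.pyGet? retros (i + 1)).getD []
     let h := pvRowGetB curr 2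
     let l := pvRowGetB curr 3
     let is_high := h > pvRowGetB prev 2 ∧ h > pvRowGetB next_ 2
     let is_low := l < pvRowGetB prev 3 ∧ l < pvRowGetB next_ 3
     if is_high ∧ is_low then
       if (match st.getLast? with | some last => last.2.1 == "high" | none => false) then
         pvMerge st i "low" l
       else pvMerge st i "high" h
     else if is_high then pvMerge st i "high" h
     else if is_low then pvMerge st i "low" l
     else st) = (pvEmit retros i).foldl pvStepA st := by
  simp only [pvEmit, pvRowGetB, pvRowGet]
  cases hst : st.getLast? with
  | none =>
      have hnil : st = [] := List.getLast?_eq_none_iff.mp hst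
      subst hnil
      split_ifs <;> simp_all [pvStepA, pvMerge]
  | some last =>
      by_cases hl : last.2.1 = "high"
      · split_ifs <;> simp_all [pvStepA, pvMerge]
      · by_cases hl2 : last.2.1 = "low"
        · split_ifs <;> simp_all [pvStepA, pvMerge]
        · split_ifs <;> simp_all [pvStepA, pvMerge, Ne.symm hl, Ne.symm hl2]

-- the fused equality, unconditionally (both ports totalise out-of-range row reads the same way)
theorem pv_main (retros : List (List Int)) (trend : String) (ob_touch_index : Int) :
    find_highs_lows_15m retros trend ob_touch_index =
      find_highs_lows_15m_alt retros trend ob_touch_index := by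
  have hA := pv_foldl_emit_append
    (f := fun (acc : List (Int × String × Int × Option Int)) (i : Int) =>
      let prev := (PySem.List.pyGet? retros (i - 1)).getD []
      let curr := (PySem.List.pyGet? retros i).getD []
      let next_ := (PySem.List.pyGet? retros (i + 1)).getD []
      let h := pvRowGet curr 2
      let l := pvRowGet curr 3
      let is_high := h > pvRowGet prev 2 ∧ h > pvRowGet next_ 2
      let is_low := l < pvRowGet prev 3 ∧ l < pvRowGet next_ 3
      if is_high ∧ is_low then acc ++ [(i, "both", h, some l)]
      else if is_high then acc ++ [(i, "high", h, none)]
      else if is_low then acc ++ [(i, "low", l, (none : Option Int))]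
      else acc)
    (g := pvEmit retros)
    (fun acc a => by simp only [pvEmit]; split_ifs <;> simp)
    (PySem.List.pyRange 1 ((retros.length : Int) - 1) 1) []
  have hB := pv_foldl_body_flatMap
    (f := fun (filtered : List (Int × String × Int)) (i : Int) =>
      let prev := (PySem.List.pyGet? retros (i - 1)).getD []
      let curr := (PySem.List.pyGet? retros i).getD []
      let next_ := (PySem.List.pyGet? retros (i + 1)).getD []
      let h := pvRowGetB curr 2
      let l := pvRowGetB curr 3
      let is_high := h > pvRowGetB prev 2 ∧ h > pvRowGetB next_ 2
      let is_low := l < pvRowGetB prev 3 ∧ l < pvRowGetB next_ 3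
      if is_high ∧ is_low then
        if (match filtered.getLast? with | some last => last.2.1 == "high" | none => false) then
          pvMerge filtered i "low" l
        else pvMerge filtered i "high" h
      else if is_high then pvMerge filtered i "high" h
      else if is_low then pvMerge filtered i "low" l
      else filtered)
    (g := pvEmit retros) (step := pvStepA)
    (fun st a => pvStep_emit retros st a)
    (PySem.List.pyRange 1 ((retros.length : Int) - 1) 1)
  unfold find_highs_lows_15m find_highs_lows_15m_alt
  rw [hA]
  by_cases hu : trend = "uptrend"
  · subst hu
    rw [hB]
    simp [pvStepA, pvMerge, pvRowGetB, pvRowGet, PySem.Dict.get?, PySem.Dict.ofList,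
      PySem.Dict.empty, PySem.Dict.update, PySem.Dict.insert, List.find?]
  · by_cases hd : trend = "downtrend"
    · subst hd
      rw [hB]
      simp [hu, pvStepA, pvMerge, pvRowGetB, pvRowGet, PySem.Dict.get?, PySem.Dict.ofList,
        PySem.Dict.empty, PySem.Dict.update, PySem.Dict.insert, List.find?]
    · rw [hB]
      have hbu : ("uptrend" == trend) = false := by simp [Ne.symm hu]
      have hbd : ("downtrend" == trend) = false := by simp [Ne.symm hd]
      simp [hu, hd, hbu, hbd, PySem.Dict.get?, PySem.Dict.ofList,
        PySem.Dict.empty, PySem.Dict.update, PySem.Dict.insert, List.find?]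

-- ===== VERDICT (by name: the statement is the Claim_ definition above) =====
theorem find_highs_lows_15m_spec : Claim_equal_find_highs_lows_15m := by
  intro retros trend ob _ _
  unfold Spec_find_highs_lows_15m
  exact pv_main retros trend ob
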